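-- pv_equiv track=rewrite | github.com/tigantic/physics-os | apps/qtenet/src/qtenet/qtenet/solvers/vlasov6d_genuine.py | _all_spatial_sites_sorted
-- ===== SOURCE A (Python) =====
-- def _all_spatial_sites_sorted(
--     num_qubits_total: int, num_dims: int, spatial_axes: list[int]
-- ) -> list[int]:
--     """Return the sorted list of spatial-bit site indices."""
--     sites: list[int] = []
--     for k in range(num_qubits_total):
--         morton_bit = num_qubits_total - 1 - k
--         if morton_bit % num_dims in spatial_axes:
--             sites.append(k)
--     return sites
-- ===== SOURCE B (Python) =====
-- def _all_spatial_sites_sorted(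
--     num_qubits_total: int, num_dims: int, spatial_axes: list[int]
-- ) -> list[int]:
--     """Return the sorted list of spatial-bit site indices.
--
--     A site index k qualifies iff its morton bit N-1-k falls (mod num_dims)
--     on a spatial axis, i.e. k lies on an arithmetic progression of stride
--     num_dims.  Generate those progressions directly, one per axis.
--     """
--     sites: set[int] = set()
--     for r in set(spatial_axes):
--         if 0 <= r < num_dims:
--             start = (num_qubits_total - 1 - r) % num_dims
--             sites.update(range(start, num_qubits_total, num_dims))
--     return sorted(sites)
-- ===== Notes on version B (the rewrite author's own statement) =====
-- stated objective: faster
-- what changed: Instead of scanning every qubit index and testing its morton-bit residue against the axis list, B enumerates each distinct in-range axis once and generates its arithmetic progression of matching indices directly, returning the sorted union; Pre_ restricts to the natural domain of a positive dimension count (or an empty qubit range), excluding num_dims <= 0 with qubits present, where A's negative-modulus residues and its ZeroDivisionError at num_dims = 0 are accidents of Python's modulo.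
-- outside the precondition, e.g. on _all_spatial_sites_sorted(2, -2, [-1]): A returns [0], B returns []; on _all_spatial_sites_sorted(2, 0, [0]): A raises ZeroDivisionError, B returns []
import Mathlib
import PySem

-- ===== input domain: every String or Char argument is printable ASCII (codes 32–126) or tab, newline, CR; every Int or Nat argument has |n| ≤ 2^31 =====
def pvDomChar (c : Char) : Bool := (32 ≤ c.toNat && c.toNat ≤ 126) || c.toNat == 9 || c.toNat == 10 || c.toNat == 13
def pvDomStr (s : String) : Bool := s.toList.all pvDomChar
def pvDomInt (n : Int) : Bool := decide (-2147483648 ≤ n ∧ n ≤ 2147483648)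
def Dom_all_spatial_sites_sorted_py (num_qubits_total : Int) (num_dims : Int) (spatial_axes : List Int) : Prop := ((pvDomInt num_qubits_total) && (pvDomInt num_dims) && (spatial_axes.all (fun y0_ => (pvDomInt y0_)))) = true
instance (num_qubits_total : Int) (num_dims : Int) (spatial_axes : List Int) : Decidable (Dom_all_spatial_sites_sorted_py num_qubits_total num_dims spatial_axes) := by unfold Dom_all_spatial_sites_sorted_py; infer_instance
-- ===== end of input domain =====

-- B replaces A's per-qubit scan-and-filter by per-axis arithmetic-progression generation (output-sensitive instead of scanning all N indices).

-- ===== PORT A =====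
def all_spatial_sites_sorted_py (num_qubits_total : Int) (num_dims : Int) (spatial_axes : List Int) : List Int :=
  (PySem.List.pyRange 0 num_qubits_total 1).foldl
    (fun sites k =>
      if spatial_axes.contains (PySem.Int.mod (num_qubits_total - 1 - k) num_dims)
      then sites ++ [k] else sites) []

-- ===== PORT B =====
def all_spatial_sites_sorted_py_alt (num_qubits_total : Int) (num_dims : Int) (spatial_axes : List Int) : List Int :=
  let sites : PySem.Set Int :=
    (PySem.Set.ofList spatial_axes).foldl
      (fun s r =>
        if 0 ≤ r ∧ r < num_dims then
          PySem.Set.update s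
            (PySem.List.pyRange (PySem.Int.mod (num_qubits_total - 1 - r) num_dims) num_qubits_total num_dims)
        else s) PySem.Set.empty
  PySem.List.sorted sites (fun x => x)

-- ===== PRECONDITION & SPEC =====
-- Pre_ restricts to the natural domain of a positive dimension count (or an empty qubit range):
-- for num_dims ≤ 0 with qubits present, A's negative-modulus residues (and its ZeroDivisionError
-- at num_dims = 0) are accidents of Python's modulo, not behaviour anyone would specify.
def Pre_all_spatial_sites_sorted_py (num_qubits_total : Int) (num_dims : Int) (spatial_axes : List Int) : Prop :=
  0 < num_dims ∨ num_qubits_total ≤ 0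
instance (num_qubits_total : Int) (num_dims : Int) (spatial_axes : List Int) : Decidable (Pre_all_spatial_sites_sorted_py num_qubits_total num_dims spatial_axes) := by unfold Pre_all_spatial_sites_sorted_py; infer_instance
def pvWitness_all_spatial_sites_sorted_py : Int × Int × List Int := (8, 3, [0, 2])


def Spec_all_spatial_sites_sorted_py (num_qubits_total : Int) (num_dims : Int) (spatial_axes : List Int) (out : List Int) : Prop := out = all_spatial_sites_sorted_py_alt num_qubits_total num_dims spatial_axes
instance (num_qubits_total : Int) (num_dims : Int) (spatial_axes : List Int) (out : List Int) : Decidable (Spec_all_spatial_sites_sorted_py num_qubits_total num_dims spatial_axes out) := by unfold Spec_all_spatial_sites_sorted_py; infer_instance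

-- ===== CLAIM (what is proved, stated in full; the proofs are below) =====
def Claim_equal_all_spatial_sites_sorted_py : Prop := ∀ (num_qubits_total : Int) (num_dims : Int) (spatial_axes : List Int), Dom_all_spatial_sites_sorted_py num_qubits_total num_dims spatial_axes → Pre_all_spatial_sites_sorted_py num_qubits_total num_dims spatial_axes → Spec_all_spatial_sites_sorted_py num_qubits_total num_dims spatial_axes (all_spatial_sites_sorted_py num_qubits_total num_dims spatial_axes)

-- ===== LEMMAS AND PROOFS =====

-- d divides a - (a fmod d) (for positive d)
theorem pv_dvd_sub_fmod (a d : Int) (hd : 0 < d) : d ∣ a - Int.fmod a d := by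
  rw [Int.fmod_def]
  have h : a - (a - d * a.fdiv d) = d * a.fdiv d := by ring
  rw [h]
  exact ⟨a.fdiv d, rfl⟩

-- congruence mod d determines fmod
theorem pv_fmod_congr (a c d : Int) (hd : 0 < d) (h : d ∣ a - c) : Int.fmod a d = Int.fmod c d := by
  obtain ⟨t, ht⟩ := h
  have ha : a = c + d * t := by omega
  rw [ha, Int.add_mul_fmod_self_left]

theorem pv_emod_le (k m : Int) (h0 : 0 ≤ k) (hm : 0 < m) : k % m ≤ k := by
  have h1 : 0 ≤ k / m := Int.ediv_nonneg h0 hm.le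
  have h2 : k % m + k / m * m = k := Int.emod_add_ediv_mul k m
  nlinarith

-- membership in B's accumulated set
theorem pv_mem_fold_sets {g : Int → List Int} {c : Int → Prop} [DecidablePred c] (l : List Int) (s0 : PySem.Set Int) (y : Int) :
    y ∈ l.foldl (fun s r => if c r then PySem.Set.update s (g r) else s) s0 ↔
      y ∈ s0 ∨ ∃ r ∈ l, c r ∧ y ∈ g r := by
  induction l generalizing s0 with
  | nil => simp
  | cons r l ih =>
      simp only [List.foldl_cons, ih]
      by_cases hc : c r
      · simp [hc, PySem.Set.mem_update, or_assoc]
      · simp [hc]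

theorem pv_nodup_fold_sets {g : Int → List Int} {c : Int → Prop} [DecidablePred c] (l : List Int) (s0 : PySem.Set Int)
    (h0 : s0.Nodup) :
    (l.foldl (fun s r => if c r then PySem.Set.update s (g r) else s) s0).Nodup := by
  induction l generalizing s0 with
  | nil => exact h0
  | cons r l ih =>
      simp only [List.foldl_cons]
      by_cases hc : c r
      · simp only [hc, if_pos]
        exact ih _ (by
          unfold PySem.Set.update
          induction g r generalizing s0 with
          | nil => exact h0
          | cons x xs ih2 => exact ih2 _ (PySem.Set.nodup_add s0 x h0))
      · simp only [hc, if_neg, not_false_iff]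
        exact ih _ h0

-- a fold whose branch is never taken is the start state
theorem pv_fold_sets_id {g : Int → List Int} {c : Int → Prop} [DecidablePred c] (l : List Int) (s0 : PySem.Set Int)
    (h : ∀ r, ¬ c r) :
    l.foldl (fun s r => if c r then PySem.Set.update s (g r) else s) s0 = s0 := by
  induction l generalizing s0 with
  | nil => rfl
  | cons r l ih => simp only [List.foldl_cons, if_neg (h r)]; exact ih s0

-- the arithmetic core: k is kept by A iff k lies in the progression of some in-range axis r
theorem pv_core (N d k : Int) (axes : List Int) (hd : 0 < d) (hk0 : 0 ≤ k) (hkN : k < N) :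
    (PySem.Int.mod (N - 1 - k) d ∈ axes) ↔
      ∃ r ∈ axes, (0 ≤ r ∧ r < d) ∧
        k ∈ PySem.List.pyRange (PySem.Int.mod (N - 1 - r) d) N d := by
  constructor
  · intro hmem
    refine ⟨PySem.Int.mod (N - 1 - k) d, hmem, ⟨?_, ?_⟩, ?_⟩
    · simpa [PySem.Int.mod, Int.fmod_eq_emod_of_nonneg _ hd.le] using
        Int.emod_nonneg (N - 1 - k) (by omega)
    · simpa [PySem.Int.mod, Int.fmod_eq_emod_of_nonneg _ hd.le] using
        Int.emod_lt_of_pos (N - 1 - k) hd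
    · set r := PySem.Int.mod (N - 1 - k) d with hr
      have hdvd1 : d ∣ (N - 1 - k) - r := pv_dvd_sub_fmod (N - 1 - k) d hd
      have hcong : Int.fmod (N - 1 - r) d = Int.fmod k d := by
        apply pv_fmod_congr _ _ _ hd
        obtain ⟨t, ht⟩ := hdvd1
        exact ⟨t, by omega⟩
      rw [PySem.List.mem_pyRange_iff_of_pos hd k]
      refine ⟨?_, hkN, ?_⟩
      · show PySem.Int.mod (N - 1 - r) d ≤ k
        have hx : PySem.Int.mod (N - 1 - r) d = k % d := by
          simpa [PySem.Int.mod, Int.fmod_eq_emod_of_nonneg _ hd.le] using hcong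
        rw [hx]
        exact pv_emod_le k d hk0 hd
      · show d ∣ k - PySem.Int.mod (N - 1 - r) d
        have hx : PySem.Int.mod (N - 1 - r) d = Int.fmod k d := hcong
        rw [hx]
        exact pv_dvd_sub_fmod k d hd
  · rintro ⟨r, hr, ⟨hr0, hrd⟩, hrange⟩
    rw [PySem.List.mem_pyRange_iff_of_pos hd k] at hrange
    obtain ⟨hstart, -, hdvd⟩ := hrange
    have hdvd2 : d ∣ (N - 1 - r) - Int.fmod (N - 1 - r) d := pv_dvd_sub_fmod (N - 1 - r) d hd
    simp only [PySem.Int.mod] at hdvd ⊢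
    have hcong : Int.fmod (N - 1 - k) d = Int.fmod r d := by
      apply pv_fmod_congr _ _ _ hd
      obtain ⟨t, ht⟩ := hdvd
      obtain ⟨u, hu⟩ := hdvd2
      exact ⟨u - t, by rw [mul_sub]; omega⟩
    have hfix : Int.fmod r d = r := by
      rw [Int.fmod_eq_emod_of_nonneg _ hd.le]
      exact Int.emod_eq_of_lt hr0 hrd
    rw [hcong, hfix]
    exact hr

-- ===== VERDICT (by name: the statement is the Claim_ definition above) =====
theorem all_spatial_sites_sorted_py_spec : Claim_equal_all_spatial_sites_sorted_py := by
  intro N d axes _ hpre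
  show all_spatial_sites_sorted_py N d axes = all_spatial_sites_sorted_py_alt N d axes
  unfold all_spatial_sites_sorted_py all_spatial_sites_sorted_py_alt
  rcases lt_or_ge 0 d with hd | hd
  · rw [PySem.List.foldl_append_if_eq_filter]
    simp only [List.nil_append]
    symm
    apply PySem.List.sorted_eq_of_perm_of_pairwise_lt
    · refine (List.perm_ext_iff_of_nodup
        ((PySem.List.nodup_pyRange_one 0 N).filter _)
        (pv_nodup_fold_sets (c := fun r => 0 ≤ r ∧ r < d)
          (g := fun r => PySem.List.pyRange (PySem.Int.mod (N - 1 - r) d) N d) _ _ List.nodup_nil)).mpr ?_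
      intro k
      refine Iff.trans List.mem_filter (Iff.trans ?_ (pv_mem_fold_sets
          (c := fun r => 0 ≤ r ∧ r < d)
          (g := fun r => PySem.List.pyRange (PySem.Int.mod (N - 1 - r) d) N d)
          (PySem.Set.ofList axes) PySem.Set.empty k).symm)
      rw [PySem.List.mem_pyRange_one]
      simp only [PySem.Set.mem_ofList, PySem.Set.empty, List.not_mem_nil, false_or,
        List.contains_iff_mem]
      constructor
      · rintro ⟨⟨hk0, hkN⟩, hp⟩
        exact (pv_core N d k axes hd hk0 hkN).mp hp
      · rintro ⟨r, hr, hcr, hrange⟩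
        have h1 := (PySem.List.mem_pyRange_iff_of_pos hd k).mp hrange
        have hstart : 0 ≤ PySem.Int.mod (N - 1 - r) d := by
          simpa [PySem.Int.mod, Int.fmod_eq_emod_of_nonneg _ hd.le] using
            Int.emod_nonneg (N - 1 - r) (by omega)
        have hk0 : 0 ≤ k := le_trans hstart h1.1
        exact ⟨⟨hk0, h1.2.1⟩, (pv_core N d k axes hd hk0 h1.2.1).mpr ⟨r, hr, hcr, hrange⟩⟩
    · exact (PySem.List.pairwise_lt_pyRange_one 0 N).filter _
  · have hN : N ≤ 0 := by rcases hpre with h | h <;> omega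
    rw [PySem.List.pyRange_one_eq_nil (by omega)]
    rw [pv_fold_sets_id (c := fun r => 0 ≤ r ∧ r < d) _ _ (fun r hc => by omega)]
    rfl
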